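-- pv_equiv track=rewrite | github.com/qbic-projects/Microbial-OMICs | src/ontoHandler/ontoHandler.py | getPrefixesOwl
-- ===== SOURCE A (Python) =====
-- def getPrefixesOwl(dictionary: dict) -> dict:
--     prefixes = set()
--     prefixDictionary = dict()
--     for key in dictionary.keys():
--         processedKey = key.split("/")[-1].split("_")[0]
--         prefixes.update([processedKey])
--     for key in dictionary.keys():
--         processedKey = key.split("/")[-1].split("_")[0]
--         if processedKey in prefixes:
--             prefixDictionary[processedKey] = key.split("_")[0] +"_"
--             prefixes.remove(processedKey)
--         else:
--             continue
--     return prefixDictionary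
-- ===== SOURCE B (Python) =====
-- def getPrefixesOwl(dictionary: dict) -> dict:
--     prefixDictionary = dict()
--     for key in dictionary.keys():
--         processedKey = key.split("/")[-1].split("_")[0]
--         if processedKey not in prefixDictionary:
--             prefixDictionary[processedKey] = key.split("_")[0] + "_"
--     return prefixDictionary
-- ===== Notes on version B (the rewrite author's own statement) =====
-- stated objective: simpler
-- what changed: B replaces A's two passes over the keys (first building a set of all processed prefixes, then a second scan that assigns and consumes the set) with a single pass that assigns a prefix only when it is not yet a key of the result dict (first-occurrence wins), dropping the auxiliary set entirely.
import Mathlib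
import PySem

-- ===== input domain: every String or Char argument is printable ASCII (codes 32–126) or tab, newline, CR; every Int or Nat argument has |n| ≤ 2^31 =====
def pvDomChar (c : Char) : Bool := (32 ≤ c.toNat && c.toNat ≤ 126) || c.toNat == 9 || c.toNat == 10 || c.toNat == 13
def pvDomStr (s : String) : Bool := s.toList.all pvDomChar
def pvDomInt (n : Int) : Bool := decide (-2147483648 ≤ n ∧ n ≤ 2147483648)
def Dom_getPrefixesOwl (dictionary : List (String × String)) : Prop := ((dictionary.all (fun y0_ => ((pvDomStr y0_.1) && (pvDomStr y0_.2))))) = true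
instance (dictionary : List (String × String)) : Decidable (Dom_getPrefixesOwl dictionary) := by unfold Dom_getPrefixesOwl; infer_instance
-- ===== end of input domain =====

-- B replaces A's two passes (a prefix set built first, then a second scan consuming it)
-- by one pass keyed on dict membership; objective: simpler. Return-value equivalence only.

-- ===== PORT A =====
-- shared subexpressions of both Pythons:
-- key.split("/")[-1].split("_")[0]   ([-1]/[0] never raise: splitOn is never empty, so getLastD/headD are exact)
def pvProc (key : String) : String :=
  (((PySem.Str.split? (((PySem.Str.split? key "/").getD []).getLastD "") "_").getD []).headD "")
-- key.split("_")[0] + "_"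
def pvVal (key : String) : String :=
  (((PySem.Str.split? key "_").getD []).headD "") ++ "_"

def getPrefixesOwl (dictionary : List (String × String)) : List (String × String) :=
  let ks := (PySem.Dict.ofList dictionary).keys
  let prefixes : PySem.Set String :=
    ks.foldl (fun s key => PySem.Set.update s [pvProc key]) PySem.Set.empty
  let st :=
    ks.foldl (fun (st : PySem.Set String × PySem.Dict String String) key =>
      let p := pvProc key
      if PySem.Set.contains st.1 p then
        -- prefixes.remove(p): p is present (just tested), so discard is exact here
        (PySem.Set.discard st.1 p, st.2.insert p (pvVal key))
      else st) (prefixes, PySem.Dict.empty)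
  st.2.items

-- ===== PORT B =====
def getPrefixesOwl_alt (dictionary : List (String × String)) : List (String × String) :=
  ((PySem.Dict.ofList dictionary).keys.foldl
    (fun d key =>
      let p := pvProc key
      if d.contains p then d else d.insert p (pvVal key))
    PySem.Dict.empty).items

-- ===== PRECONDITION & SPEC =====
def Spec_getPrefixesOwl (dictionary : List (String × String)) (out : List (String × String)) : Prop := out = getPrefixesOwl_alt dictionary
instance (dictionary : List (String × String)) (out : List (String × String)) : Decidable (Spec_getPrefixesOwl dictionary out) := by unfold Spec_getPrefixesOwl; infer_instance

-- ===== CLAIM (what is proved, stated in full; the proofs are below) =====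
def Claim_equal_getPrefixesOwl : Prop := ∀ (dictionary : List (String × String)), Dom_getPrefixesOwl dictionary → Spec_getPrefixesOwl dictionary (getPrefixesOwl dictionary)

-- ===== LEMMAS AND PROOFS =====

-- Invariant: along the loop, a prefix is still in A's set iff it is not yet a key of the dict.
theorem pv_loop_eq (ks : List String) (s : PySem.Set String) (d : PySem.Dict String String)
    (H : ∀ k ∈ ks, PySem.Set.contains s (pvProc k) = !(d.contains (pvProc k))) :
    (ks.foldl (fun (st : PySem.Set String × PySem.Dict String String) key =>
        let p := pvProc key
        if PySem.Set.contains st.1 p then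
          (PySem.Set.discard st.1 p, st.2.insert p (pvVal key))
        else st) (s, d)).2
    = ks.foldl (fun d key =>
        let p := pvProc key
        if d.contains p then d else d.insert p (pvVal key)) d := by
  induction ks generalizing s d with
  | nil => rfl
  | cons k tl ih =>
    simp only [List.foldl_cons]
    by_cases hc : d.contains (pvProc k) = true
    · have hA : (if PySem.Set.contains s (pvProc k) = true then
          (PySem.Set.discard s (pvProc k), d.insert (pvProc k) (pvVal k)) else (s, d)) = (s, d) := by
        rw [H k (List.mem_cons_self ..), hc]; simp
      rw [hA, if_pos hc]
      exact ih s d (fun k' hk' => H k' (List.mem_cons_of_mem _ hk'))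
    · have hc' : d.contains (pvProc k) = false := by simpa using hc
      have hA : (if PySem.Set.contains s (pvProc k) = true then
          (PySem.Set.discard s (pvProc k), d.insert (pvProc k) (pvVal k)) else (s, d)) =
          (PySem.Set.discard s (pvProc k), d.insert (pvProc k) (pvVal k)) := by
        rw [H k (List.mem_cons_self ..), hc']; simp
      rw [hA, if_neg hc]
      apply ih
      intro k' hk'
      rw [PySem.Dict.contains_insert]
      have hthis := H k' (List.mem_cons_of_mem _ hk')
      simp only [PySem.Set.contains_eq_listContains, List.contains_eq_mem] at hthis ⊢
      by_cases he : pvProc k' = pvProc k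
      · simp [PySem.Set.mem_discard, he]
      · simp [PySem.Set.mem_discard, he, hthis]

-- Initially every processed key is in the prefix set and not in the (empty) dict.
theorem pv_init (ks : List String) (k : String) (hk : k ∈ ks) :
    PySem.Set.contains
      (ks.foldl (fun s key => PySem.Set.update s [pvProc key]) PySem.Set.empty) (pvProc k) = true := by
  have hfe : (fun (s : PySem.Set String) key => PySem.Set.update s [pvProc key])
      = fun s key => PySem.Set.add s (pvProc key) := by
    funext s key; simp [PySem.Set.update]
  rw [hfe]
  simp only [PySem.Set.contains_eq_listContains]
  simp [PySem.Set.mem_foldl_add]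
  exact ⟨k, hk, rfl⟩

-- ===== VERDICT (by name: the statement is the Claim_ definition above) =====
theorem getPrefixesOwl_spec : Claim_equal_getPrefixesOwl := by
  intro dictionary _
  unfold Spec_getPrefixesOwl getPrefixesOwl getPrefixesOwl_alt
  simp only []
  congr 1
  apply pv_loop_eq
  intro k hk
  rw [pv_init _ _ hk]
  simp [PySem.Dict.contains_empty]
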